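-- pv_equiv track=rewrite | github.com/Trace231/SGD_formal | orchestrator/sample_test_watch.py | parse_agent8_decision
-- ===== SOURCE A (Python) =====
-- from typing import Any
--
-- def parse_agent8_decision(captured: str) -> dict[str, Any]:
--     latest: dict[str, Any] = {}
--     for line in captured.splitlines():
--         if "[Agent8] tick=" not in line:
--             continue
--         parts = line.strip()
--         latest = {"raw": parts}
--         for token in parts.replace("[Agent8]", "").split():
--             if "=" not in token:
--                 continue
--             key, value = token.split("=", 1)
--             latest[key.strip()] = value.strip()
--     reason = ""
--     for line in reversed(captured.splitlines()):
--         if "[Agent8] reason:" in line: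
--             reason = line.split("reason:", 1)[1].strip()
--             break
--     if latest:
--         latest["reason"] = reason
--     return latest
-- ===== SOURCE B (Python) =====
-- def _parse_tick(line):
--     parts = line.strip()
--     latest = {"raw": parts}
--     for token in parts.replace("[Agent8]", "").split():
--         if "=" in token:
--             key, value = token.split("=", 1)
--             latest[key.strip()] = value.strip()
--     return latest
--
--
-- def parse_agent8_decision(captured: str) -> dict:
--     last_tick = None
--     last_reason = None
--     for line in captured.splitlines():
--         if "[Agent8] tick=" in line:
--             last_tick = line
--         if "[Agent8] reason:" in line:
--             last_reason = line
--     if last_tick is None: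
--         return {}
--     latest = _parse_tick(last_tick)
--     latest["reason"] = (
--         last_reason.split("reason:", 1)[1].strip() if last_reason is not None else ""
--     )
--     return latest
-- ===== Notes on version B (the rewrite author's own statement) =====
-- stated objective: simpler
-- what changed: B makes one forward pass that only records the last tick line and the last reason line, then parses key=value tokens and the reason text once after the loop, instead of A's re-parsing every tick line inside the loop plus a second reversed scan for the reason.
import Mathlib
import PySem

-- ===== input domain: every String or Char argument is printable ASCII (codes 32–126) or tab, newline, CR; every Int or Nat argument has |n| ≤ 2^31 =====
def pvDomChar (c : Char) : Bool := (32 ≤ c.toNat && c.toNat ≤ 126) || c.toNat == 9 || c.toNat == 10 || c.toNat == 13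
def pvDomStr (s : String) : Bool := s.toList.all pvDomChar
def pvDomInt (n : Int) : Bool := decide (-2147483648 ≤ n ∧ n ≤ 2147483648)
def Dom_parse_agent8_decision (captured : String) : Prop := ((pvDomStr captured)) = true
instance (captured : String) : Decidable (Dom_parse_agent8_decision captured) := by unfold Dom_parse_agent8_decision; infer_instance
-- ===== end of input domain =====

-- B makes one forward pass recording only the last tick line and the last reason line and parses
-- them once after the loop (A re-parses every tick line and makes a second reversed scan); objective: simpler.

-- ===== PORT A =====
def parse_agent8_decision (captured : String) : List (String × String) :=
  let latest : PySem.Dict String String :=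
    (PySem.Str.splitlines captured).foldl (fun latest line =>
      if PySem.Str.isIn "[Agent8] tick=" line then
        let parts := PySem.Str.strip line
        (PySem.Str.split₀ (PySem.Str.replace parts "[Agent8]" "")).foldl
          (fun d token =>
            if PySem.Str.isIn "=" token then
              match PySem.Str.splitMax? token "=" 1 with
              | some (key :: value :: _) =>
                  PySem.Dict.insert d (PySem.Str.strip key) (PySem.Str.strip value)
              | _ => d
            else d)
          (PySem.Dict.insert PySem.Dict.empty "raw" parts)
      else latest)
      PySem.Dict.empty
  let reason : String :=
    match (PySem.Str.splitlines captured).reverse.find?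
        (fun line => PySem.Str.isIn "[Agent8] reason:" line) with
    | some line =>
        match PySem.Str.splitMax? line "reason:" 1 with
        | some (_ :: rest :: _) => PySem.Str.strip rest
        | _ => ""
    | none => ""
  if latest.items = [] then latest.items
  else (PySem.Dict.insert latest "reason" reason).items

-- ===== PORT B =====
-- B-side helper: parse one tick line into the dict (Source B's _parse_tick)
def parseTickLine (line : String) : PySem.Dict String String :=
  let parts := PySem.Str.strip line
  (PySem.Str.split₀ (PySem.Str.replace parts "[Agent8]" "")).foldl
    (fun d token =>
      if PySem.Str.isIn "=" token then
        -- token.split("=", 1): sep ≠ "" so splitMax? is always `some`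
        match (PySem.Str.splitMax? token "=" 1).getD [] with
        | [] => d
        | [_] => d
        | key :: value :: _ =>
            PySem.Dict.insert d (PySem.Str.strip key) (PySem.Str.strip value)
      else d)
    (PySem.Dict.insert PySem.Dict.empty "raw" parts)

-- B-side helper: line.split("reason:", 1)[1].strip()
def reasonText (line : String) : String :=
  match (PySem.Str.splitMax? line "reason:" 1).getD [] with
  | [] => ""
  | [_] => ""
  | _ :: rest :: _ => PySem.Str.strip rest

def parse_agent8_decision_alt (captured : String) : List (String × String) :=
  let st :=
    (PySem.Str.splitlines captured).foldl
      (fun (st : Option String × Option String) line =>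
        ((if PySem.Str.isIn "[Agent8] tick=" line then some line else st.1),
         (if PySem.Str.isIn "[Agent8] reason:" line then some line else st.2)))
      (none, none)
  match st with
  | (none, _) => []
  | (some tline, lastReason) =>
      let reason : String := (lastReason.map reasonText).getD ""
      (PySem.Dict.insert (parseTickLine tline) "reason" reason).items

-- ===== PRECONDITION & SPEC =====
def Spec_parse_agent8_decision (captured : String) (out : List (String × String)) : Prop := out = parse_agent8_decision_alt captured
instance (captured : String) (out : List (String × String)) : Decidable (Spec_parse_agent8_decision captured out) := by unfold Spec_parse_agent8_decision; infer_instance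

-- ===== CLAIM (what is proved, stated in full; the proofs are below) =====
def Claim_equal_parse_agent8_decision : Prop := ∀ (captured : String), Dom_parse_agent8_decision captured → Spec_parse_agent8_decision captured (parse_agent8_decision captured)

-- ===== LEMMAS AND PROOFS =====

-- a fold that overwrites its state on every line satisfying p computes f of the LAST such line
theorem foldl_last_if {α : Type} (p : String → Bool) (f : String → α) :
    ∀ (ls : List String) (s : α),
      ls.foldl (fun acc l => if p l then f l else acc) s
        = match ls.reverse.find? p with | some l => f l | none => s := by
  intro ls
  induction ls with
  | nil => intro s; rfl
  | cons x xs ih =>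
      intro s
      simp only [List.foldl_cons, List.reverse_cons, List.find?_append, ih]
      cases h : xs.reverse.find? p with
      | some l => simp [Option.or]
      | none =>
          cases hp : p x <;> simp [hp, Option.or, List.find?]

theorem insert_items_ne_nil (d : PySem.Dict String String) (k v : String) :
    (PySem.Dict.insert d k v).items ≠ [] := by
  rw [PySem.Dict.items_insert]
  cases hc : d.contains k with
  | false => simp
  | true =>
      simp only [ite_true, ne_eq, List.map_eq_nil_iff]
      intro hnil
      have hk : k ∈ d.keys := (PySem.Dict.contains_iff_mem_keys d k).mp hc
      simp [PySem.Dict.keys, hnil] at hk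

-- the token loop only ever keeps or inserts, so the dict stays nonempty
theorem tokFold_ne_nil :
    ∀ (toks : List String) (d : PySem.Dict String String), d.items ≠ [] →
      ((toks.foldl (fun d token =>
          if PySem.Str.isIn "=" token then
            match (PySem.Str.splitMax? token "=" 1).getD [] with
            | [] => d
            | [_] => d
            | key :: value :: _ =>
                PySem.Dict.insert d (PySem.Str.strip key) (PySem.Str.strip value)
          else d) d).items ≠ []) := by
  intro toks
  induction toks with
  | nil => intro d h; exact h
  | cons t ts ih =>
      intro d h
      simp only [List.foldl_cons]
      apply ih
      by_cases hc : PySem.Str.isIn "=" t = true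
      · rw [if_pos hc]
        cases hs : (PySem.Str.splitMax? t "=" 1).getD [] with
        | nil => exact h
        | cons key rest =>
            cases rest with
            | nil => exact h
            | cons value rest2 => exact insert_items_ne_nil _ _ _
      · rw [if_neg hc]; exact h

theorem parseTickLine_items_ne_nil (line : String) :
    (parseTickLine line).items ≠ [] := by
  unfold parseTickLine
  exact tokFold_ne_nil _ _ (insert_items_ne_nil _ _ _)

-- A's inline token branch and B's (which reads split(...,1) through getD) agree
theorem innerStep_eq :
    (fun (d : PySem.Dict String String) token =>
      if PySem.Str.isIn "=" token then
        match PySem.Str.splitMax? token "=" 1 with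
        | some (key :: value :: _) =>
            PySem.Dict.insert d (PySem.Str.strip key) (PySem.Str.strip value)
        | _ => d
      else d)
    = (fun (d : PySem.Dict String String) token =>
      if PySem.Str.isIn "=" token then
        match (PySem.Str.splitMax? token "=" 1).getD [] with
        | [] => d
        | [_] => d
        | key :: value :: _ =>
            PySem.Dict.insert d (PySem.Str.strip key) (PySem.Str.strip value)
      else d) := by
  funext d token
  by_cases h : PySem.Str.isIn "=" token = true
  · rw [if_pos h, if_pos h]
    cases hs : PySem.Str.splitMax? token "=" 1 with
    | none => rfl
    | some parts =>
        cases parts with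
        | nil => rfl
        | cons k r => cases r with | nil => rfl | cons v r2 => rfl
  · rw [if_neg h, if_neg h]

-- A's outer loop body parses a tick line exactly as B's helper does
theorem outerStep_eq :
    (fun (latest : PySem.Dict String String) line =>
        if PySem.Str.isIn "[Agent8] tick=" line then
          let parts := PySem.Str.strip line
          (PySem.Str.split₀ (PySem.Str.replace parts "[Agent8]" "")).foldl
            (fun d token =>
              if PySem.Str.isIn "=" token then
                match PySem.Str.splitMax? token "=" 1 with
                | some (key :: value :: _) =>
                    PySem.Dict.insert d (PySem.Str.strip key) (PySem.Str.strip value)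
                | _ => d
              else d)
            (PySem.Dict.insert PySem.Dict.empty "raw" parts)
        else latest)
      = (fun (latest : PySem.Dict String String) line =>
          if PySem.Str.isIn "[Agent8] tick=" line then parseTickLine line else latest) := by
  funext latest line
  by_cases h : PySem.Str.isIn "[Agent8] tick=" line = true
  · rw [if_pos h, if_pos h]
    simp only [parseTickLine]
    rw [innerStep_eq]
  · rw [if_neg h, if_neg h]

-- A's inline reason extraction equals B's helper
theorem reasonText_eq (line : String) :
    (match PySem.Str.splitMax? line "reason:" 1 with
     | some (_ :: rest :: _) => PySem.Str.strip rest
     | _ => "") = reasonText line := by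
  simp only [reasonText]
  cases hs : PySem.Str.splitMax? line "reason:" 1 with
  | none => rfl
  | some parts =>
      cases parts with
      | nil => rfl
      | cons a r => cases r with | nil => rfl | cons b r2 => rfl

-- ===== VERDICT (by name: the statement is the Claim_ definition above) =====
theorem parse_agent8_decision_spec : Claim_equal_parse_agent8_decision := by
  intro captured _
  unfold Spec_parse_agent8_decision parse_agent8_decision parse_agent8_decision_alt
  rw [PySem.List.foldl_prod_mk
        (f := fun (t : Option String) line =>
          if PySem.Str.isIn "[Agent8] tick=" line then some line else t)
        (g := fun (r : Option String) line =>
          if PySem.Str.isIn "[Agent8] reason:" line then some line else r)]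
  rw [outerStep_eq]
  rw [foldl_last_if (fun line => PySem.Str.isIn "[Agent8] tick=" line) parseTickLine,
      foldl_last_if (fun line => PySem.Str.isIn "[Agent8] tick=" line) some,
      foldl_last_if (fun line => PySem.Str.isIn "[Agent8] reason:" line) some]
  cases ht : (PySem.Str.splitlines captured).reverse.find?
      (fun line => PySem.Str.isIn "[Agent8] tick=" line) with
  | none =>
      have h0 : (PySem.Dict.empty : PySem.Dict String String).items = [] := rfl
      rw [if_pos h0]
      exact h0
  | some tl =>
      simp only
      rw [if_neg (parseTickLine_items_ne_nil tl)]
      cases hr : (PySem.Str.splitlines captured).reverse.find?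
          (fun line => PySem.Str.isIn "[Agent8] reason:" line) with
      | none => rfl
      | some rl =>
          exact congrArg
            (fun r => (PySem.Dict.insert (parseTickLine tl) "reason" r).items)
            (reasonText_eq rl)
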